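-- pv_equiv track=rewrite | github.com/smerrillunc/deception2 | BS/src/localization.py | merge_adjacent_indices
-- ===== SOURCE A (Python) =====
-- def merge_adjacent_indices(indices, max_gap=1):
--     if not indices:
--         return []
--     indices = sorted(set(indices))
--     spans = []
--     current = [indices[0]]
--     for idx in indices[1:]:
--         if idx <= current[-1] + max_gap:
--             current.append(idx)
--         else:
--             spans.append(current)
--             current = [idx]
--     spans.append(current)
--     return spans
-- ===== SOURCE B (Python) =====
-- def merge_adjacent_indices(indices, max_gap=1):
--     if not indices:
--         return []
--     s = sorted(set(indices))
--     bounds = [0] + [i for i in range(1, len(s)) if s[i] > s[i - 1] + max_gap] + [len(s)]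
--     return [s[a:b] for a, b in zip(bounds, bounds[1:])]
-- ===== Notes on version B (the rewrite author's own statement) =====
-- stated objective: alternative
-- what changed: Replaces A's accumulator-append loop (growing a current span and flushing it) with a find-split-points-then-slice decomposition: compute the break positions in one comprehension, form the boundary list, and return the slices between consecutive bounds.
import Mathlib
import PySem

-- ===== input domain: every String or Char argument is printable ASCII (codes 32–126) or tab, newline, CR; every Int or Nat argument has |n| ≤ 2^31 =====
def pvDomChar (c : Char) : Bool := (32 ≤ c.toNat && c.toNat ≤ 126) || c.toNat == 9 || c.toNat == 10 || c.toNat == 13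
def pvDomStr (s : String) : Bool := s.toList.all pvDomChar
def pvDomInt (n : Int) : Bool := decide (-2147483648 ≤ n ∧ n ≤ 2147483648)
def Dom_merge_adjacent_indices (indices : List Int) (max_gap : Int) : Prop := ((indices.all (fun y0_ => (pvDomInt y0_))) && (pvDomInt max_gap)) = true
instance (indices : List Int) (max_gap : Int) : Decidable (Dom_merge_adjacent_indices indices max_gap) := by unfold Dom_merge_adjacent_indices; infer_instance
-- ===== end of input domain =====

-- B replaces A's accumulator-append loop by a find-break-positions-then-slice decomposition (alternative structure, same cost).

-- ===== PORT A =====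
def merge_adjacent_indices (indices : List Int) (max_gap : Int) : List (List Int) :=
  if indices = [] then []
  else
    let s := PySem.List.sorted (PySem.Set.ofList indices) (fun x => x) false
    let st := (PySem.List.slice s (some 1) none).foldl
      (fun (st : List (List Int) × List Int) idx =>
        if idx ≤ PySem.List.pyGetD st.2 (-1) 0 + max_gap then (st.1, st.2 ++ [idx])
        else (st.1 ++ [st.2], [idx]))
      ([], [PySem.List.pyGetD s 0 0])
    st.1 ++ [st.2]

-- ===== PORT B =====
def merge_adjacent_indices_alt (indices : List Int) (max_gap : Int) : List (List Int) :=
  if indices = [] then []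
  else
    let s := PySem.List.sorted (PySem.Set.ofList indices) (fun x => x) false
    let bounds : List Int :=
      0 :: (PySem.List.pyRange 1 (s.length : Int) 1).filter
            (fun i => decide (PySem.List.pyGetD s (i - 1) 0 + max_gap < PySem.List.pyGetD s i 0))
         ++ [(s.length : Int)]
    (bounds.zip bounds.tail).map (fun ab => PySem.List.slice s (some ab.1) (some ab.2))

-- ===== PRECONDITION & SPEC =====
def Spec_merge_adjacent_indices (indices : List Int) (max_gap : Int) (out : List (List Int)) : Prop := out = merge_adjacent_indices_alt indices max_gap
instance (indices : List Int) (max_gap : Int) (out : List (List Int)) : Decidable (Spec_merge_adjacent_indices indices max_gap out) := by unfold Spec_merge_adjacent_indices; infer_instance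

-- ===== CLAIM (what is proved, stated in full; the proofs are below) =====
def Claim_equal_merge_adjacent_indices : Prop := ∀ (indices : List Int) (max_gap : Int), Dom_merge_adjacent_indices indices max_gap → Spec_merge_adjacent_indices indices max_gap (merge_adjacent_indices indices max_gap)

-- ===== LEMMAS AND PROOFS =====

-- Common characterization: `pvExt g x xs = (elements of xs merging into the group whose
-- last element is x, remaining groups)`.
def pvExt (g : Int) (x : Int) : List Int → List Int × List (List Int)
  | [] => ([], [])
  | y :: ys =>
    let p := pvExt g y ys
    if y ≤ x + g then (y :: p.1, p.2) else ([], (y :: p.1) :: p.2)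

def pvChunks (g : Int) : List Int → List (List Int)
  | [] => []
  | x :: xs => (x :: (pvExt g x xs).1) :: (pvExt g x xs).2

-- break positions of B, as a function of the (sorted) list
def pvBre (g : Int) (s : List Int) : List Int :=
  (PySem.List.pyRange 1 (s.length : Int) 1).filter
    (fun i => decide (PySem.List.pyGetD s (i - 1) 0 + g < PySem.List.pyGetD s i 0))

def pvBcore (g : Int) (s : List Int) : List (List Int) :=
  let bounds : List Int := 0 :: pvBre g s ++ [(s.length : Int)]
  (bounds.zip bounds.tail).map (fun ab => PySem.List.slice s (some ab.1) (some ab.2))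

theorem pvFoldA (g : Int) : ∀ (xs : List Int) (spans : List (List Int)) (cur : List Int) (x : Int),
    (let st := xs.foldl
      (fun (st : List (List Int) × List Int) idx =>
        if idx ≤ PySem.List.pyGetD st.2 (-1) 0 + g then (st.1, st.2 ++ [idx])
        else (st.1 ++ [st.2], [idx]))
      (spans, cur ++ [x]);
     st.1 ++ [st.2])
    = spans ++ ((cur ++ [x]) ++ (pvExt g x xs).1) :: (pvExt g x xs).2 := by
  intro xs
  induction xs with
  | nil => intro spans cur x; simp [pvExt]
  | cons y ys ih =>
    intro spans cur x
    simp only [List.foldl_cons, PySem.List.pyGetD_neg_one_append_singleton, pvExt]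
    by_cases h : y ≤ x + g
    · simpa [h, List.append_assoc] using ih spans (cur ++ [x]) y
    · simpa [h, List.append_assoc] using ih (spans ++ [cur ++ [x]]) [] y

-- helper: pyGetD on a cons at a positive index
theorem pvGetD_cons_pos (x : Int) (t : List Int) (j : Int) (h : 1 ≤ j) :
    PySem.List.pyGetD (x :: t) j 0 = PySem.List.pyGetD t (j - 1) 0 := by
  rw [PySem.List.pyGetD_of_nonneg _ _ (by omega : (0:Int) ≤ j),
      PySem.List.pyGetD_of_nonneg _ _ (by omega : (0:Int) ≤ j - 1)]
  have h2 : j.toNat = (j - 1).toNat + 1 := by omega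
  rw [h2, List.getD_cons_succ]

theorem pvBre_nonneg (g : Int) (s : List Int) : ∀ z ∈ pvBre g s, 1 ≤ z := by
  intro z hz
  exact (PySem.List.mem_pyRange_one.mp (List.mem_of_mem_filter hz)).1

theorem pvRange_shift (m : Nat) :
    PySem.List.pyRange 1 ((m : Int) + 2) 1 = 1 :: (PySem.List.pyRange 1 ((m : Int) + 1) 1).map (· + 1) := by
  rw [PySem.List.pyRange_one, PySem.List.pyRange_one]
  have e1 : ((m : Int) + 2 - 1).toNat = m + 1 := by omega
  have e2 : ((m : Int) + 1 - 1).toNat = m := by omega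
  rw [e1, e2, List.range_succ_eq_map, List.map_cons, List.map_map, List.map_map]
  refine congrArg₂ _ (by norm_num) (List.map_congr_left (fun k _ => ?_))
  simp [Function.comp]
  ring

theorem pvBre_shift (g x y : Int) (r : List Int) :
    pvBre g (x :: y :: r)
      = (if x + g < y then [(1 : Int)] else []) ++ (pvBre g (y :: r)).map (· + 1) := by
  unfold pvBre
  have hlen : (((x :: y :: r).length : Int)) = (r.length : Int) + 2 := by
    push_cast [List.length_cons]; ring
  have hlen2 : (((y :: r).length : Int)) = (r.length : Int) + 1 := by
    push_cast [List.length_cons]; ring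
  rw [hlen, hlen2, pvRange_shift r.length, List.filter_cons, List.filter_map]
  have hA : PySem.List.pyGetD (x :: y :: r) ((1 : Int) - 1) 0 = x := by
    norm_num [PySem.List.pyGetD_zero_cons]
  have hB : PySem.List.pyGetD (x :: y :: r) (1 : Int) 0 = y := by
    rw [pvGetD_cons_pos _ _ _ le_rfl]
    norm_num [PySem.List.pyGetD_zero_cons]
  rw [hA, hB]
  have hcong : ∀ j ∈ PySem.List.pyRange 1 ((r.length : Int) + 1) 1,
      ((fun i => decide (PySem.List.pyGetD (x :: y :: r) (i - 1) 0 + g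
          < PySem.List.pyGetD (x :: y :: r) i 0)) ∘ (· + 1)) j
        = (fun i => decide (PySem.List.pyGetD (y :: r) (i - 1) 0 + g
          < PySem.List.pyGetD (y :: r) i 0)) j := by
    intro j hj
    have h1 : 1 ≤ j := (PySem.List.mem_pyRange_one.mp hj).1
    simp only [Function.comp]
    have e0 : j + 1 - 1 = j := by ring
    rw [e0, pvGetD_cons_pos x (y :: r) (j + 1) (by omega), pvGetD_cons_pos x (y :: r) j h1, e0]
  rw [List.filter_congr hcong]
  by_cases hxy : x + g < y
  · simp [hxy]
  · simp [hxy]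

theorem pvSlice_shift (x : Int) (t : List Int) (a b : Int) (ha : 0 ≤ a) (hb : 0 ≤ b) :
    PySem.List.slice (x :: t) (some (a + 1)) (some (b + 1)) = PySem.List.slice t (some a) (some b) := by
  rw [PySem.List.slice_toNat _ (by omega) (by omega), PySem.List.slice_toNat _ ha hb]
  have e1 : (a + 1).toNat = a.toNat + 1 := by omega
  have e2 : (b + 1).toNat = b.toNat + 1 := by omega
  rw [e1, e2, List.drop_succ_cons, Nat.succ_sub_succ]

theorem pvSlice_zero (x : Int) (t : List Int) (b : Int) (hb : 0 ≤ b) :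
    PySem.List.slice (x :: t) (some 0) (some (b + 1)) = x :: PySem.List.slice t (some 0) (some b) := by
  rw [PySem.List.slice_toNat _ le_rfl (by omega), PySem.List.slice_toNat _ le_rfl hb]
  have e2 : (b + 1).toNat = b.toNat + 1 := by omega
  simp [e2, List.take_succ_cons]

theorem pvBnds_nonneg (g : Int) (t : List Int) :
    ∀ z ∈ pvBre g t ++ [((t.length : Nat) : Int)], 0 ≤ z := by
  intro z hz
  rcases List.mem_append.mp hz with h | h
  · exact le_trans (by norm_num) (pvBre_nonneg g t z h)
  · simp only [List.mem_singleton] at h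
    simp [h]

theorem pvB_eq_chunks (g : Int) : ∀ (t : List Int) (x : Int),
    pvBcore g (x :: t) = pvChunks g (x :: t) := by
  intro t
  induction t with
  | nil =>
    intro x
    unfold pvBcore pvBre pvChunks pvExt
    simp [PySem.List.slice_toNat]
  | cons y r ih =>
    intro x
    unfold pvBcore
    have hlen : ((((x :: y :: r).length : Nat)) : Int) = (((y :: r).length : Nat) : Int) + 1 := by
      push_cast [List.length_cons]; ring
    rw [pvBre_shift, hlen]
    set B : List Int := pvBre g (y :: r) ++ [(((y :: r).length : Nat) : Int)] with hB
    have hBeq : (pvBre g (y :: r)).map (· + 1) ++ [(((y :: r).length : Nat) : Int) + 1]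
        = B.map (· + 1) := by
      rw [hB, List.map_append]; rfl
    have hnn : ∀ z ∈ (0 : Int) :: B, 0 ≤ z := by
      intro z hz
      rcases List.mem_cons.mp hz with h | h
      · omega
      · exact pvBnds_nonneg g (y :: r) z h
    have hcore : pvBcore g (y :: r)
        = (((0 : Int) :: B).zip B).map
            (fun ab => PySem.List.slice (y :: r) (some ab.1) (some ab.2)) := rfl
    by_cases hxy : x + g < y
    · -- break after x: spans = [x] :: spans of (y :: r)
      rw [if_pos hxy]
      simp only [List.cons_append, List.nil_append]
      rw [hBeq]
      have h1map : (1 : Int) :: B.map (· + 1) = ((0 : Int) :: B).map (· + 1) := by simp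
      rw [List.tail_cons, List.zip_cons_cons, h1map, List.zip_map]
      simp only [List.map_cons, List.map_map]
      have hfirst : PySem.List.slice (x :: y :: r) (some (0 : Int)) (some (1 : Int)) = [x] := by
        rw [PySem.List.slice_toNat _ le_rfl (by norm_num)]
        rfl
      rw [hfirst]
      have hrest : (((0 : Int) :: B).zip B).map
            ((fun ab => PySem.List.slice (x :: y :: r) (some ab.1) (some ab.2))
              ∘ Prod.map (· + 1) (· + 1))
          = (((0 : Int) :: B).zip B).map
            (fun ab => PySem.List.slice (y :: r) (some ab.1) (some ab.2)) := by
        refine List.map_congr_left (fun ab hab => ?_)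
        obtain ⟨h1, h2⟩ := List.of_mem_zip hab
        simp only [Function.comp, Prod.map]
        exact pvSlice_shift x (y :: r) ab.1 ab.2 (hnn _ h1) (hnn _ (List.mem_cons_of_mem _ h2))
      rw [hrest, ← hcore, ih y]
      have hc : ¬ y ≤ x + g := by omega
      simp [pvChunks, pvExt, hc]
    · -- no break: x joins the first span of (y :: r)
      rw [if_neg hxy]
      simp only [List.cons_append, List.nil_append]
      rw [hBeq]
      obtain ⟨b1, B', hB'⟩ : ∃ b1 B', B = b1 :: B' := by
        cases hc : B with
        | nil => exact absurd (congrArg List.length hc) (by simp [hB])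
        | cons a l => exact ⟨a, l, rfl⟩
      rw [hB']
      rw [List.map_cons, List.tail_cons, List.zip_cons_cons]
      rw [show ((b1 + 1 : Int) :: B'.map (· + 1)) = ((b1 : Int) :: B').map (· + 1) from by simp,
          List.zip_map]
      simp only [List.map_cons, List.map_map]
      have hb1 : 0 ≤ b1 := hnn b1 (by simp [hB'])
      rw [pvSlice_zero x (y :: r) b1 hb1]
      have hrest : (((b1 : Int) :: B').zip B').map
            ((fun ab => PySem.List.slice (x :: y :: r) (some ab.1) (some ab.2))
              ∘ Prod.map (· + 1) (· + 1))
          = (((b1 : Int) :: B').zip B').map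
            (fun ab => PySem.List.slice (y :: r) (some ab.1) (some ab.2)) := by
        refine List.map_congr_left (fun ab hab => ?_)
        obtain ⟨h1, h2⟩ := List.of_mem_zip hab
        have hm1 : ab.1 ∈ (0 : Int) :: B := by
          rw [hB']; exact List.mem_cons_of_mem _ h1
        have hm2 : ab.2 ∈ (0 : Int) :: B := by
          rw [hB']; exact List.mem_cons_of_mem _ (List.mem_cons_of_mem _ h2)
        simp only [Function.comp, Prod.map]
        exact pvSlice_shift x (y :: r) ab.1 ab.2 (hnn _ hm1) (hnn _ hm2)
      rw [hrest]
      have hcore' : pvBcore g (y :: r)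
          = PySem.List.slice (y :: r) (some 0) (some b1)
            :: (((b1 : Int) :: B').zip B').map
              (fun ab => PySem.List.slice (y :: r) (some ab.1) (some ab.2)) := by
        rw [hcore, hB', List.zip_cons_cons]
        rfl
      have hih := ih y
      rw [hcore'] at hih
      have hchy : pvChunks g (y :: r) = (y :: (pvExt g y r).1) :: (pvExt g y r).2 := by
        simp [pvChunks]
      rw [hchy] at hih
      obtain ⟨hh, ht⟩ := List.cons_eq_cons.mp hih
      have hgoal : pvChunks g (x :: y :: r)
          = (x :: y :: (pvExt g y r).1) :: (pvExt g y r).2 := by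
        have hc : y ≤ x + g := by omega
        simp [pvChunks, pvExt, hc]
      rw [hgoal, hh, ht]

-- ===== VERDICT (by name: the statement is the Claim_ definition above) =====
theorem merge_adjacent_indices_spec : Claim_equal_merge_adjacent_indices := by
  intro indices g _
  unfold Spec_merge_adjacent_indices merge_adjacent_indices merge_adjacent_indices_alt
  by_cases hi : indices = []
  · simp [hi]
  · rw [if_neg hi, if_neg hi]
    set s := PySem.List.sorted (PySem.Set.ofList indices) (fun x => x) false with hs
    obtain ⟨x, t, hst⟩ : ∃ x t, s = x :: t := by
      cases hc : s with
      | nil =>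
        exfalso
        have := (PySem.List.sorted_eq_nil_iff (PySem.Set.ofList indices) (fun x => x) false).mp
          (hs ▸ hc)
        obtain ⟨z, zs, rfl⟩ := List.exists_cons_of_ne_nil hi
        have : z ∈ PySem.Set.ofList (z :: zs) := (PySem.Set.mem_ofList _ _).mpr (by simp)
        simp_all
      | cons a l => exact ⟨a, l, rfl⟩
    rw [hst]
    simp only [PySem.List.slice_from_one, List.tail_cons, PySem.List.pyGetD_zero_cons]
    have hA := pvFoldA g t [] [] x
    simp only [List.nil_append] at hA
    rw [hA]
    exact (pvB_eq_chunks g t x).symm
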